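-- pv_equiv track=rewrite | github.com/sdeery14/personal-ai-assistant | eval/pipeline/aggregator.py | _extract_case_id_from_session
-- ===== SOURCE A (Python) =====
-- def _extract_case_id_from_session(session_id: str) -> str:
--     """Extract a readable case_id from a session ID.
--
--     Session IDs typically have a format like 'contra-{uuid_prefix}-contra-subtle-mismatch'.
--     This extracts the meaningful suffix after the UUID-like prefix.
--     """
--     parts = session_id.split("-")
--     # Find the second occurrence of the eval prefix (e.g., 'contra', 'onb', 'meminf')
--     # and take everything from there onwards
--     if len(parts) >= 3:
--         # Try to find a UUID-like segment (8+ hex chars) and skip past it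
--         for i, part in enumerate(parts[1:], start=1):
--             if len(part) >= 8 and all(c in "0123456789abcdef" for c in part.lower()):
--                 # Found UUID-like prefix — return everything after it
--                 remainder = "-".join(parts[i + 1:])
--                 if remainder:
--                     return remainder
--     return session_id
-- ===== SOURCE B (Python) =====
-- def _extract_case_id_from_session(session_id: str) -> str:
--     """Index-based re-implementation: precompute a prefix-sum table of
--     non-hex characters and the list of dash positions, then check each
--     segment between consecutive dashes in O(1) via the table."""
--     s = session_id
--     n = len(s)
--     hexdigits = "0123456789abcdef"
--     # bad[k] = number of non-hex characters among s[:k]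
--     bad = [0]
--     total = 0
--     for c in s:
--         total += c.lower() not in hexdigits
--         bad.append(total)
--     dashes = [k for k, c in enumerate(s) if c == "-"]
--     # a qualifying segment lies strictly between two dashes: length >= 8,
--     # no non-hex char inside (prefix sums equal), and a non-empty remainder
--     for t in range(1, len(dashes)):
--         a = dashes[t - 1] + 1
--         b = dashes[t]
--         if b - a >= 8 and bad[b] == bad[a] and b + 1 < n:
--             return s[b + 1:]
--     return s
-- ===== Notes on version B (the rewrite author's own statement) =====
-- stated objective: alternative
-- what changed: B abandons A's split-into-parts + per-part all(...) scan + join: it precomputes a prefix-sum table of non-hex characters and the list of dash positions, then checks each segment between consecutive dashes in O(1) via the table and returns the suffix slice after the closing dash.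
import Mathlib
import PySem

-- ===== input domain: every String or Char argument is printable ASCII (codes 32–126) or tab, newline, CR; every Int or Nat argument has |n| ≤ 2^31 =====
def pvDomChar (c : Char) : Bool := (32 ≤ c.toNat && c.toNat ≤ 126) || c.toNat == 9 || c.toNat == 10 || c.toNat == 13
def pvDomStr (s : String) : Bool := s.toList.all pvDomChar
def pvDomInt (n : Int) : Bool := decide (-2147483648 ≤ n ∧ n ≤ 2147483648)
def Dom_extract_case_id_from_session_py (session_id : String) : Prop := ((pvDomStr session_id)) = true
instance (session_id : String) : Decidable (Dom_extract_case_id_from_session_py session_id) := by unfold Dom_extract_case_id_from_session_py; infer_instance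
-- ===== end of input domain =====

-- B replaces A's split/enumerate/join with a prefix-sum table of non-hex chars plus a list
-- of dash positions, checking each inter-dash segment in O(1) via the table (alternative
-- algorithm, same asymptotic cost).


-- ===== PORT A =====
-- A's inner test `len(part) >= 8 and all(c in "0123456789abcdef" for c in part.lower())`
def pvIsUuidish (p : List Char) : Bool :=
  decide (8 ≤ p.length) && (PySem.Chars.lower p).all (fun c => PySem.Chars.isIn [c] "0123456789abcdef".toList)

-- A's `for i, part in enumerate(parts[1:], start=1)` loop; `some r` = `return r`, `none` = fall through
def pvALoop (fullparts : List (List Char)) : List (List Char) → Nat → Option (List Char)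
  | [], _ => none
  | p :: ps, i =>
    if pvIsUuidish p then
      let remainder := PySem.Chars.join ['-'] (fullparts.drop (i + 1))
      if remainder ≠ [] then some remainder else pvALoop fullparts ps (i + 1)
    else pvALoop fullparts ps (i + 1)

def extract_case_id_from_session_py (session_id : String) : String :=
  let parts := PySem.Chars.splitOn session_id.toList ['-']
  if 3 ≤ parts.length then
    match pvALoop parts (parts.drop 1) 1 with
    | some remainder => String.ofList remainder
    | none => session_id
  else session_id

-- ===== PORT B =====
-- B's per-char test `c.lower() not in hexdigits`
def pvBadChar (c : Char) : Bool :=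
  !(PySem.Chars.isIn (PySem.Chars.lower [c]) "0123456789abcdef".toList)

-- B's `for c in s: total += (c.lower() not in hexdigits); bad.append(total)` loop
def pvBadBuild : List Char → List Nat → Nat → List Nat × Nat
  | [], bad, total => (bad, total)
  | c :: cs, bad, total =>
    let total' := total + (if pvBadChar c then 1 else 0)
    pvBadBuild cs (bad ++ [total']) total'

-- B's `dashes = [k for k, c in enumerate(s) if c == "-"]`
def pvDashes (cs : List Char) : List Int :=
  ((PySem.List.enumerate cs 0).filter (fun p => p.2 == '-')).map Prod.fst

-- B's `for t in range(1, len(dashes))` loop over consecutive dash pairs; `some r` = `return s[b+1:]`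
-- (bad[b] / bad[a] indices are always in range, so pyGetD's default is never consulted)
def pvScan (cs : List Char) (n : Int) (bad : List Nat) : List Int → Option (List Char)
  | [] => none
  | [_] => none
  | d0 :: d1 :: rest =>
    let a := d0 + 1
    let b := d1
    if 8 ≤ b - a ∧ PySem.List.pyGetD bad b 0 = PySem.List.pyGetD bad a 0 ∧ b + 1 < n then
      some (PySem.Chars.slice cs (some (b + 1)) none)
    else pvScan cs n bad (d1 :: rest)

def extract_case_id_from_session_py_alt (session_id : String) : String :=
  let cs := session_id.toList
  let n : Int := cs.length
  let bad := (pvBadBuild cs [0] 0).1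
  match pvScan cs n bad (pvDashes cs) with
  | some r => String.ofList r
  | none => session_id

-- ===== PRECONDITION & SPEC =====
def Spec_extract_case_id_from_session_py (session_id : String) (out : String) : Prop := out = extract_case_id_from_session_py_alt session_id
instance (session_id : String) (out : String) : Decidable (Spec_extract_case_id_from_session_py session_id out) := by unfold Spec_extract_case_id_from_session_py; infer_instance

-- ===== CLAIM (what is proved, stated in full; the proofs are below) =====
def Claim_equal_extract_case_id_from_session_py : Prop := ∀ (session_id : String), Dom_extract_case_id_from_session_py session_id → Spec_extract_case_id_from_session_py session_id (extract_case_id_from_session_py session_id)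

-- ===== LEMMAS AND PROOFS =====

-- ---- A-side: split/loop characterisation ----
def pvSplit (cs : List Char) : List (List Char) :=
  cs.takeWhile (fun c => c ≠ '-') ::
    (match h : cs.dropWhile (fun c => c ≠ '-') with
     | [] => []
     | _ :: r => pvSplit r)
termination_by cs.length
decreasing_by
  have h1 := List.length_dropWhile_le (p := fun c => c ≠ '-') (l := cs)
  rw [h] at h1; simp at h1; omega

theorem pvSplit_nil_case (cs : List Char) (h : cs.dropWhile (fun c => c ≠ '-') = []) :
    pvSplit cs = [cs.takeWhile (fun c => c ≠ '-')] := by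
  rw [pvSplit]; split
  · rfl
  · next x r heq => rw [h] at heq; cases heq

theorem pvSplit_cons_case (cs : List Char) (x : Char) (r : List Char)
    (h : cs.dropWhile (fun c => c ≠ '-') = x :: r) :
    pvSplit cs = cs.takeWhile (fun c => c ≠ '-') :: pvSplit r := by
  rw [pvSplit]; split
  · next heq => rw [h] at heq; cases heq
  · next x' r' heq => rw [h] at heq; cases heq; rfl

theorem pvGo_eq (fuel : Nat) (l cur acc : _) (hf : l.length < fuel) :
    PySem.Chars.splitOn.go ['-'] fuel l cur acc
      = acc.reverse ++ (pvSplit l).modifyHead (fun t => cur.reverse ++ t) := by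
  induction fuel generalizing l cur acc with
  | zero => omega
  | succ fuel ih =>
    cases l with
    | nil =>
      rw [pvSplit_nil_case [] (by simp)]
      simp [PySem.Chars.splitOn.go]
    | cons c rest =>
      rw [PySem.Chars.splitOn.go]
      by_cases hc : c = '-'
      · subst hc
        rw [if_pos (show ['-'].isPrefixOf ('-' :: rest) = true from by simp [List.isPrefixOf])]
        rw [show List.drop (['-'].length) ('-' :: rest) = rest from rfl]
        rw [ih _ _ _ (by simp at hf ⊢; omega)]
        rw [pvSplit_cons_case ('-' :: rest) '-' rest (by simp [List.dropWhile])]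
        cases pvSplit rest <;> simp [List.takeWhile]
      · have hpre : ['-'].isPrefixOf (c :: rest) = false := by
          simp [List.isPrefixOf]; exact fun h => (hc h.symm).elim
        rw [hpre]
        simp only [Bool.false_eq_true, if_neg, not_false_iff]
        rw [ih _ _ _ (by simp at hf ⊢; omega)]
        have hd : (c :: rest).dropWhile (fun c => c ≠ '-') = rest.dropWhile (fun c => c ≠ '-') := by
          simp [List.dropWhile, hc]
        have ht : (c :: rest).takeWhile (fun c => c ≠ '-') = c :: rest.takeWhile (fun c => c ≠ '-') := by
          simp [List.takeWhile, hc]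
        cases h2 : rest.dropWhile (fun c => c ≠ '-') with
        | nil =>
          rw [pvSplit_nil_case rest h2, pvSplit_nil_case (c :: rest) (by rw [hd, h2]), ht]
          simp
        | cons x r =>
          rw [pvSplit_cons_case rest x r h2, pvSplit_cons_case (c :: rest) x r (by rw [hd, h2]), ht]
          simp

theorem splitOn_eq_pvSplit (cs : List Char) : PySem.Chars.splitOn cs ['-'] = pvSplit cs := by
  rw [PySem.Chars.splitOn, pvGo_eq _ _ _ _ (by omega)]
  cases pvSplit cs <;> simp

theorem pvDropWhile_head (cs : List Char) (x : Char) (r : List Char)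
    (h : cs.dropWhile (fun c => c ≠ '-') = x :: r) : x = '-' := by
  induction cs with
  | nil => cases h
  | cons c rest ih =>
    rw [List.dropWhile] at h
    by_cases hc : c = '-'
    · simp [hc] at h; exact h.1.symm
    · rw [show (decide (c ≠ '-')) = true from by simp [hc]] at h
      exact ih h

theorem join_pvSplit (cs : List Char) : PySem.Chars.join ['-'] (pvSplit cs) = cs := by
  induction hn : cs.length using Nat.strong_induction_on generalizing cs with
  | _ n ih =>
  cases h : cs.dropWhile (fun c => c ≠ '-') with
  | nil =>
    rw [pvSplit_nil_case cs h]
    have htw := List.takeWhile_append_dropWhile (p := fun c => c ≠ '-') (l := cs)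
    rw [h, List.append_nil] at htw
    rw [PySem.Chars.join_singleton, htw]
  | cons x r =>
    have hx : x = '-' := pvDropWhile_head cs x r h
    subst hx
    rw [pvSplit_cons_case cs '-' r h]
    have hlen : (cs.dropWhile (fun c => c ≠ '-')).length ≤ cs.length :=
      List.length_dropWhile_le _ _
    rw [h] at hlen; simp at hlen
    have hr : PySem.Chars.join ['-'] (pvSplit r) = r := ih r.length (by omega) r rfl
    obtain ⟨q, tl, hq⟩ : ∃ q tl, pvSplit r = q :: tl := by
      cases h2 : r.dropWhile (fun c => c ≠ '-') with
      | nil => exact ⟨_, _, pvSplit_nil_case r h2⟩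
      | cons y s => exact ⟨_, _, pvSplit_cons_case r y s (by
          have := pvDropWhile_head r y s h2; subst this; exact h2)⟩
    rw [hq] at hr ⊢
    rw [PySem.Chars.join_cons_cons, hr]
    have htw := List.takeWhile_append_dropWhile (p := fun c => c ≠ '-') (l := cs)
    rw [h] at htw
    conv_rhs => rw [← htw]
    simp

theorem pvSplit_dashfree (cs : List Char) : ∀ p ∈ pvSplit cs, ∀ c ∈ p, c ≠ '-' := by
  induction hn : cs.length using Nat.strong_induction_on generalizing cs with
  | _ n ih =>
  have hhead : ∀ c ∈ cs.takeWhile (fun c => c ≠ '-'), c ≠ '-' := by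
    intro c hc
    have := List.mem_takeWhile_imp hc
    simpa using this
  cases h : cs.dropWhile (fun c => c ≠ '-') with
  | nil =>
    rw [pvSplit_nil_case cs h]
    intro p hp
    rw [List.mem_singleton] at hp; subst hp; exact hhead
  | cons x r =>
    have hx := pvDropWhile_head cs x r h; subst hx
    rw [pvSplit_cons_case cs '-' r h]
    have hlen : (cs.dropWhile (fun c => c ≠ '-')).length ≤ cs.length :=
      List.length_dropWhile_le _ _
    rw [h] at hlen; simp at hlen
    intro p hp
    rcases List.mem_cons.mp hp with h1 | h2
    · subst h1; exact hhead
    · exact ih r.length (by omega) r rfl p h2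

def pvALoopPure : List (List Char) → Option (List Char)
  | [] => none
  | p :: ps =>
    if pvIsUuidish p = true ∧ PySem.Chars.join ['-'] ps ≠ [] then some (PySem.Chars.join ['-'] ps)
    else pvALoopPure ps

theorem pvALoop_eq_pure (full : List (List Char)) :
    ∀ ps i, ps = full.drop i → pvALoop full ps i = pvALoopPure ps := by
  intro ps
  induction ps with
  | nil => intro i _; rfl
  | cons p tl ih =>
    intro i hdrop
    have htl : tl = full.drop (i + 1) := by
      have h2 : (full.drop i).drop 1 = full.drop (i + 1) := by
        rw [List.drop_drop, Nat.add_comm]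
      rw [← h2, ← hdrop]; rfl
    simp only [pvALoop, pvALoopPure, ← htl]
    split_ifs with h1 h2 h3 <;>
      first
        | rfl
        | (exact ih (i + 1) htl)
        | tauto

theorem pvSplit_shape (cs : List Char) : ∃ q tl, pvSplit cs = q :: tl := by
  rw [pvSplit]; exact ⟨_, _, rfl⟩

-- ---- B-side: prefix sums and dash positions ----
def pvCountBad (p : List Char) : Nat := p.countP (fun c => pvBadChar c)

def pvBadSpec (cs : List Char) : List Nat :=
  (List.range (cs.length + 1)).map (fun i => pvCountBad (cs.take i))

theorem pvBadBuild_eq (cs : List Char) : ∀ (acc : List Nat) (t : Nat),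
    pvBadBuild cs acc t
      = (acc ++ (List.range cs.length).map (fun i => t + pvCountBad (cs.take (i + 1))),
         t + pvCountBad cs) := by
  induction cs with
  | nil => intro acc t; simp [pvBadBuild, pvCountBad]
  | cons c cs ih =>
    intro acc t
    rw [pvBadBuild, ih]
    simp only [Prod.mk.injEq]
    refine ⟨?_, ?_⟩
    · simp only [List.length_cons]
      rw [List.range_succ_eq_map]
      simp only [List.map_cons, List.map_map]
      rw [List.append_assoc]
      congr 1
      simp only [List.singleton_append]
      congr 1
      · simp [pvCountBad, List.countP_cons, List.countP_nil]
      · apply List.map_congr_left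
        intro i _
        simp only [Function.comp_apply, List.take_succ_cons, pvCountBad, List.countP_cons]
        cases pvBadChar c <;> simp <;> omega
    · simp only [pvCountBad, List.countP_cons]
      cases pvBadChar c <;> simp <;> omega


theorem pvBadArr_eq (cs : List Char) : (pvBadBuild cs [0] 0).1 = pvBadSpec cs := by
  rw [pvBadBuild_eq, pvBadSpec, List.range_succ_eq_map]
  simp [Function.comp, Nat.succ_eq_add_one, pvCountBad]


theorem pvBadLookup (cs : List Char) (i : Nat) (hi : i ≤ cs.length) :
    PySem.List.pyGetD (pvBadSpec cs) (i : Int) 0 = pvCountBad (cs.take i) := by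
  rw [PySem.List.pyGetD_natCast, pvBadSpec]
  rw [List.getD_eq_getElem?_getD, List.getElem?_map, List.getElem?_range (by omega)]
  rfl


def pvDashPos : List Char → Nat → List Nat
  | [], _ => []
  | c :: cs, k => if c = '-' then k :: pvDashPos cs (k + 1) else pvDashPos cs (k + 1)

theorem pvDashes_eq (cs : List Char) :
    pvDashes cs = (pvDashPos cs 0).map (fun j : Nat => (j : Int)) := by
  have gen : ∀ (cs : List Char) (k : Nat),
      ((PySem.List.enumerate cs (k : Int)).filter (fun p => p.2 == '-')).map Prod.fst
        = (pvDashPos cs k).map (fun j : Nat => (j : Int)) := by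
    intro cs
    induction cs with
    | nil => intro k; simp [PySem.List.enumerate_nil, pvDashPos]
    | cons c cs ih =>
      intro k
      rw [PySem.List.enumerate_cons, pvDashPos]
      have hk1 : ((k : Int) + 1) = ((k + 1 : Nat) : Int) := by push_cast; ring
      by_cases hc : c = '-'
      · subst hc
        rw [List.filter_cons, if_pos (by simp), List.map_cons, if_pos rfl, List.map_cons,
          hk1, ih (k + 1)]
      · rw [List.filter_cons, if_neg (by simp [hc]), if_neg hc, hk1, ih (k + 1)]
  have := gen cs 0
  rw [pvDashes, show (0 : Int) = ((0 : Nat) : Int) by norm_num]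
  exact this


theorem pvDashPos_dashfree (p : List Char) (hp : ∀ c ∈ p, c ≠ '-') (k : Nat) :
    pvDashPos p k = [] := by
  induction p generalizing k with
  | nil => rfl
  | cons c cs ih =>
    rw [pvDashPos, if_neg (hp c (by simp))]
    exact ih (fun d hd => hp d (by simp [hd])) (k + 1)


theorem pvDashPos_append (p : List Char) (hp : ∀ c ∈ p, c ≠ '-') (r : List Char) (k : Nat) :
    pvDashPos (p ++ '-' :: r) k = (k + p.length) :: pvDashPos r (k + p.length + 1) := by
  induction p generalizing k with
  | nil => simp [pvDashPos]
  | cons c cs ih =>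
    rw [List.cons_append, pvDashPos, if_neg (hp c (by simp))]
    rw [ih (fun d hd => hp d (by simp [hd])) (k + 1)]
    have e1 : k + 1 + cs.length = k + (c :: cs).length := by simp; omega
    rw [e1]


theorem pvIsUuidish_iff (p : List Char) :
    pvIsUuidish p = true ↔ (8 ≤ p.length ∧ pvCountBad p = 0) := by
  rw [pvIsUuidish]
  simp only [Bool.and_eq_true, decide_eq_true_eq]
  constructor
  · rintro ⟨h1, h2⟩
    refine ⟨h1, ?_⟩
    rw [pvCountBad, List.countP_eq_zero]
    intro c hc
    have := List.all_eq_true.mp h2 (PySem.Chars.lowerChar c)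
      (by
        show PySem.Chars.lowerChar c ∈ PySem.Chars.lower p
        show PySem.Chars.lowerChar c ∈ p.map PySem.Chars.lowerChar
        exact List.mem_map_of_mem hc)
    simp [pvBadChar]
    exact this
  · rintro ⟨h1, h2⟩
    refine ⟨h1, ?_⟩
    rw [pvCountBad, List.countP_eq_zero] at h2
    apply List.all_eq_true.mpr
    intro x hx
    rcases List.mem_map.mp (show x ∈ p.map PySem.Chars.lowerChar from hx) with ⟨c, hc, rfl⟩
    have := h2 c hc
    simpa [pvBadChar] using this


theorem pvALoopPure_singleton (q : List Char) : pvALoopPure [q] = none := by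
  rw [pvALoopPure]
  simp [PySem.Chars.join_nil, pvALoopPure]

-- the main correspondence: B's scan over consecutive dash pairs computes A's pure loop
theorem pvScan_spec (qs : List (List Char)) : ∀ (cs : List Char) (d : Nat),
    (∀ q ∈ qs, ∀ c ∈ q, c ≠ '-') →
    d + 1 ≤ cs.length →
    cs.drop (d + 1) = PySem.Chars.join ['-'] qs →
    pvScan cs (cs.length : Int) (pvBadSpec cs)
        ((d :: pvDashPos (cs.drop (d + 1)) (d + 1)).map (fun j : Nat => (j : Int)))
      = pvALoopPure qs := by
  induction qs with
  | nil =>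
    intro cs d _ _ hdrop
    rw [PySem.Chars.join_nil] at hdrop
    rw [hdrop]
    simp [pvScan, pvDashPos, pvALoopPure]
  | cons q0 tl ih =>
    intro cs d hfree hd hdrop
    have hq0free : ∀ c ∈ q0, c ≠ '-' := hfree q0 (by simp)
    cases tl with
    | nil =>
      rw [PySem.Chars.join_singleton] at hdrop
      rw [hdrop, pvDashPos_dashfree q0 hq0free]
      simp [pvScan, pvALoopPure_singleton]
    | cons q1 tl2 =>
      have hjoin : PySem.Chars.join ['-'] (q0 :: q1 :: tl2)
          = q0 ++ '-' :: PySem.Chars.join ['-'] (q1 :: tl2) := by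
        rw [PySem.Chars.join_cons_cons]; simp
      rw [hjoin] at hdrop
      have hlen2 : cs.length
          = (d + 1) + (q0.length + 1 + (PySem.Chars.join ['-'] (q1 :: tl2)).length) := by
        have h1 : (cs.drop (d + 1)).length = cs.length - (d + 1) := List.length_drop
        rw [hdrop] at h1
        simp at h1
        omega
      have hdropd' : cs.drop (d + 1 + q0.length + 1) = PySem.Chars.join ['-'] (q1 :: tl2) := by
        rw [show d + 1 + q0.length + 1 = (d + 1) + (q0.length + 1) from by omega,
          ← List.drop_drop, hdrop,
          show q0 ++ '-' :: PySem.Chars.join ['-'] (q1 :: tl2)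
              = (q0 ++ ['-']) ++ PySem.Chars.join ['-'] (q1 :: tl2) from by simp,
          show q0.length + 1 = (q0 ++ ['-']).length from by simp,
          List.drop_left]
      have htake : cs.take (d + 1 + q0.length) = cs.take (d + 1) ++ q0 := by
        rw [show d + 1 + q0.length = (d + 1) + q0.length from rfl, List.take_add]
        congr 1
        rw [hdrop]
        exact List.take_left' rfl
      have hdash : pvDashPos (cs.drop (d + 1)) (d + 1)
          = (d + 1 + q0.length) :: pvDashPos (PySem.Chars.join ['-'] (q1 :: tl2)) (d + 1 + q0.length + 1) := by
        rw [hdrop, pvDashPos_append q0 hq0free]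
      rw [hdash]
      rw [List.map_cons, List.map_cons, pvScan]
      have hB : (PySem.List.pyGetD (pvBadSpec cs) ((d + 1 + q0.length : Nat) : Int) 0
            = PySem.List.pyGetD (pvBadSpec cs) (((d : Nat) : Int) + 1) 0)
          ↔ pvCountBad q0 = 0 := by
        rw [show (((d : Nat) : Int) + 1) = ((d + 1 : Nat) : Int) from by push_cast; ring,
          pvBadLookup cs (d + 1 + q0.length) (by omega),
          pvBadLookup cs (d + 1) hd, htake]
        simp only [pvCountBad, List.countP_append]
        omega
      have hcond : (8 ≤ ((d + 1 + q0.length : Nat) : Int) - (((d : Nat) : Int) + 1)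
            ∧ PySem.List.pyGetD (pvBadSpec cs) ((d + 1 + q0.length : Nat) : Int) 0
                = PySem.List.pyGetD (pvBadSpec cs) (((d : Nat) : Int) + 1) 0
            ∧ ((d + 1 + q0.length : Nat) : Int) + 1 < (cs.length : Int))
          ↔ (pvIsUuidish q0 = true ∧ PySem.Chars.join ['-'] (q1 :: tl2) ≠ []) := by
        rw [pvIsUuidish_iff, hB]
        have hlp : (PySem.Chars.join ['-'] (q1 :: tl2) ≠ [])
            ↔ 0 < (PySem.Chars.join ['-'] (q1 :: tl2)).length := by
          constructor
          · intro hne; exact List.length_pos_of_ne_nil hne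
          · intro hpos; exact List.ne_nil_of_length_pos hpos
        rw [hlp]
        constructor
        · rintro ⟨h1, h2, h3⟩
          refine ⟨⟨by push_cast at h1; omega, h2⟩, by push_cast at h3; omega⟩
        · rintro ⟨⟨h1, h2⟩, h3⟩
          refine ⟨by push_cast; omega, h2, by push_cast; omega⟩
      rw [pvALoopPure]
      by_cases hc : pvIsUuidish q0 = true ∧ PySem.Chars.join ['-'] (q1 :: tl2) ≠ []
      · rw [if_pos (hcond.mpr hc), if_pos hc]
        congr 1
        rw [show ((d + 1 + q0.length : Nat) : Int) + 1 = ((d + 1 + q0.length + 1 : Nat) : Int) from by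
          push_cast; ring]
        rw [PySem.Chars.slice_eq_listSlice, PySem.List.slice_from_natCast, hdropd']
      · rw [if_neg (fun hx => hc (hcond.mp hx)), if_neg hc]
        have := ih cs (d + 1 + q0.length)
          (fun q hq => hfree q (by simp [hq]))
          (by omega) hdropd'
        rw [hdropd'] at this
        exact this


-- ===== VERDICT (by name: the statement is the Claim_ definition above) =====
theorem pvDropTake_decomp (cs p r : List Char)
    (hcs : cs = p ++ '-' :: r) : cs.drop (p.length + 1) = r := by
  rw [hcs, show p ++ '-' :: r = (p ++ ['-']) ++ r from by simp,
    show p.length + 1 = (p ++ ['-']).length from by simp, List.drop_left]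

theorem extract_case_id_from_session_py_spec : Claim_equal_extract_case_id_from_session_py := by
  intro s _
  unfold Spec_extract_case_id_from_session_py
  simp only [extract_case_id_from_session_py, extract_case_id_from_session_py_alt]
  rw [splitOn_eq_pvSplit, pvBadArr_eq, pvDashes_eq]
  cases h : s.toList.dropWhile (fun c => c ≠ '-') with
  | nil =>
    have hfree : ∀ c ∈ s.toList, c ≠ '-' := by
      intro c hc
      have := List.dropWhile_eq_nil_iff.mp h c hc
      simpa using this
    rw [pvDashPos_dashfree _ hfree 0, pvSplit_nil_case _ h]
    simp [pvScan]
  | cons x r =>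
    have hx := pvDropWhile_head _ x r h
    subst hx
    have hcs : s.toList = s.toList.takeWhile (fun c => c ≠ '-') ++ '-' :: r := by
      conv_lhs => rw [← List.takeWhile_append_dropWhile (p := fun c => c ≠ '-') (l := s.toList)]
      rw [h]
    have hpfree : ∀ c ∈ s.toList.takeWhile (fun c => c ≠ '-'), c ≠ '-' := by
      intro c hc
      have := List.mem_takeWhile_imp hc
      simpa using this
    have hdropr : s.toList.drop ((s.toList.takeWhile (fun c => c ≠ '-')).length + 1) = r :=
      pvDropTake_decomp _ _ _ hcs
    have hlen : (s.toList.takeWhile (fun c => c ≠ '-')).length + 1 ≤ s.toList.length := by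
      conv_rhs => rw [hcs]
      simp
    have hdash : pvDashPos s.toList 0
        = (s.toList.takeWhile (fun c => c ≠ '-')).length ::
            pvDashPos r ((s.toList.takeWhile (fun c => c ≠ '-')).length + 1) := by
      conv_lhs => rw [hcs]
      rw [pvDashPos_append _ hpfree]
      simp
    have hmain := pvScan_spec (pvSplit r) s.toList
      ((s.toList.takeWhile (fun c => c ≠ '-')).length)
      (pvSplit_dashfree r) hlen (by rw [hdropr, join_pvSplit])
    rw [hdropr] at hmain
    rw [hdash, hmain, pvSplit_cons_case _ '-' r h]
    simp only [List.drop_succ_cons, List.drop_zero]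
    cases hpure : pvALoopPure (pvSplit r) with
    | none =>
      by_cases h3 : 3 ≤ (s.toList.takeWhile (fun c => c ≠ '-') :: pvSplit r).length
      · rw [if_pos h3,
          pvALoop_eq_pure (s.toList.takeWhile (fun c => c ≠ '-') :: pvSplit r) (pvSplit r) 1 rfl,
          hpure]
      · rw [if_neg h3]
    | some rem =>
      have h2 : ∃ a b tl2, pvSplit r = a :: b :: tl2 := by
        rcases pvSplit_shape r with ⟨q, tl, hq⟩
        cases tl with
        | nil => rw [hq, pvALoopPure_singleton] at hpure; cases hpure
        | cons b tl2 => exact ⟨q, b, tl2, hq⟩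
      obtain ⟨a, b, tl2, hq2⟩ := h2
      rw [if_pos (by rw [hq2]; simp),
        pvALoop_eq_pure (s.toList.takeWhile (fun c => c ≠ '-') :: pvSplit r) (pvSplit r) 1 rfl,
        hpure]
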